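-- pv_equiv track=rewrite | github.com/khee2/baekjoon-algorithm | 백준/Silver/3085. 사탕 게임/사탕 게임.py | max_candy
-- ===== SOURCE A (Python) =====
-- def max_candy(board, n):
--     max_count = 1
--     for i in range(n):
--         row_count = 1
--         col_count = 1
--         for j in range(1, n):
--             # 행 max 확인
--             if board[i][j] == board[i][j-1]:
--                 row_count+=1
--             else:
--                 row_count = 1
--             max_count = max(max_count, row_count)
--
--             # 열 max 확인
--             if board[j][i] == board[j - 1][i]:
--                 col_count += 1
--             else:
--                 col_count = 1
--             max_count = max(max_count, col_count)
--
--     return max_count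
-- ===== SOURCE B (Python) =====
-- def _runs(line):
--     """Lengths of the maximal runs of equal adjacent values in line."""
--     out = []
--     c = 0
--     prev = None
--     for x in line:
--         if c > 0 and x == prev:
--             c += 1
--         else:
--             if c > 0:
--                 out.append(c)
--             c = 1
--         prev = x
--     if c > 0:
--         out.append(c)
--     return out
--
--
-- def max_candy(board, n):
--     # group-then-measure: materialise the n x n rows and columns, run-length
--     # encode each line, then reduce over all run lengths (default 1).
--     rows = [[board[i][j] for j in range(n)] for i in range(n)]
--     cols = [[board[j][i] for j in range(n)] for i in range(n)]
--     best = 1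
--     for line in rows + cols:
--         for r in _runs(line):
--             best = max(best, r)
--     return best
-- ===== Notes on version B (the rewrite author's own statement) =====
-- stated objective: alternative
-- what changed: A makes one interleaved index scan keeping row/column counters with inline max updates; B materialises the n rows and n columns as lists, run-length-encodes each line into its maximal-run lengths, and then reduces max over all run lengths.
-- outside the precondition, e.g. on max_candy([[]], 1): A returns 1, B raises IndexError
import Mathlib
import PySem

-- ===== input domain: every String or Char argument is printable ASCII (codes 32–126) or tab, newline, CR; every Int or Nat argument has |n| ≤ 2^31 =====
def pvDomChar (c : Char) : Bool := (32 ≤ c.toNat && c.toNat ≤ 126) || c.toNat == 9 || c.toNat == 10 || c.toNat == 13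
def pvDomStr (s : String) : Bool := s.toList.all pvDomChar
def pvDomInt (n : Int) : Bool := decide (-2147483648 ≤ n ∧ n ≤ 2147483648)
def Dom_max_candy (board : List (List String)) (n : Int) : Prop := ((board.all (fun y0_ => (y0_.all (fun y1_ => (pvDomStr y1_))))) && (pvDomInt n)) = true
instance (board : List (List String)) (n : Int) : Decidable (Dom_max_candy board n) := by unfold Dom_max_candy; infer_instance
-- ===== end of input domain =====

-- B replaces A's interleaved row/column counters with a group-then-measure pass:
-- materialise the n rows and n columns, run-length-encode each, reduce max over run lengths.

-- shared indexing helper: board[i][j] (in range whenever Pre_ holds, so the defaults never fire)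
def pvGet (board : List (List String)) (i j : Int) : String :=
  (PySem.List.pyGet? ((PySem.List.pyGet? board i).getD []) j).getD ""

-- ===== PORT A =====
def max_candy (board : List (List String)) (n : Int) : Int :=
  (PySem.List.pyRange 0 n 1).foldl (fun max_count i =>
    ((PySem.List.pyRange 1 n 1).foldl (fun (s : Int × Int × Int) j =>
      let row_count := if pvGet board i j == pvGet board i (j - 1) then s.2.1 + 1 else 1
      let m1 := max s.1 row_count
      let col_count := if pvGet board j i == pvGet board (j - 1) i then s.2.2 + 1 else 1
      (max m1 col_count, row_count, col_count)) (max_count, 1, 1)).1) 1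

-- ===== PORT B =====
-- run-length encoding loop of Source B's _runs: state (out, c, prev)
def pvRunsStep (s : List Int × Int × Option String) (x : String) : List Int × Int × Option String :=
  if 0 < s.2.1 ∧ s.2.2 == some x then (s.1, s.2.1 + 1, some x)
  else ((if 0 < s.2.1 then s.1 ++ [s.2.1] else s.1), 1, some x)

-- trailing "if c > 0: out.append(c)" of _runs
def pvFinish (s : List Int × Int × Option String) : List Int :=
  if 0 < s.2.1 then s.1 ++ [s.2.1] else s.1

def pvRuns (line : List String) : List Int :=
  pvFinish (line.foldl pvRunsStep ([], 0, none))

def max_candy_alt (board : List (List String)) (n : Int) : Int :=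
  let rows := (PySem.List.pyRange 0 n 1).map (fun i =>
    (PySem.List.pyRange 0 n 1).map (fun j => pvGet board i j))
  let cols := (PySem.List.pyRange 0 n 1).map (fun i =>
    (PySem.List.pyRange 0 n 1).map (fun j => pvGet board j i))
  (rows ++ cols).foldl (fun best line => (pvRuns line).foldl (fun b r => max b r) best) 1

-- ===== PRECONDITION & SPEC =====
-- Pre_: the n x n boards A's nested loops index without raising.  Pre_ also excludes
-- boards whose first n rows are shorter than n with n ≤ 1 (e.g. ([[]], 1)), where A's inner
-- loop is empty so A returns 1 without ever indexing, while B's row materialisation indexes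
-- board[i][j] and raises IndexError.
def Pre_max_candy (board : List (List String)) (n : Int) : Prop :=
  n ≤ Int.ofNat board.length ∧ ∀ row ∈ board.take n.toNat, n ≤ Int.ofNat row.length
instance (board : List (List String)) (n : Int) : Decidable (Pre_max_candy board n) := by
  unfold Pre_max_candy; infer_instance

def pvWitness_max_candy : List (List String) × Int := ([["a", "b"], ["b", "b"]], 2)

def Spec_max_candy (board : List (List String)) (n : Int) (out : Int) : Prop := out = max_candy_alt board n
instance (board : List (List String)) (n : Int) (out : Int) : Decidable (Spec_max_candy board n out) := by
  unfold Spec_max_candy; infer_instance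

-- ===== CLAIM (what is proved, stated in full; the proofs are below) =====
def Claim_equal_max_candy : Prop := ∀ (board : List (List String)) (n : Int), Dom_max_candy board n → Pre_max_candy board n → Spec_max_candy board n (max_candy board n)

-- ===== LEMMAS AND PROOFS =====

-- run lengths of a pair list (current element, previous element), current run already length c
def goP : List (String × String) → Int → List Int
  | [], c => [c]
  | (x, p) :: t, c => if x == p then goP t (c + 1) else c :: goP t 1

-- recursive form of Source B's _runs from the second element on: prev element, current run length
def goE : List String → String → Int → List Int
  | [], _, c => [c]
  | x :: t, p, c => if x == p then goE t x (c + 1) else c :: goE t x 1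

-- adjacent (element, previous element) pairs of p :: xs
def adjP : String → List String → List (String × String)
  | _, [] => []
  | p, x :: t => (x, p) :: adjP x t

theorem foldl_max_push (l : List Int) (m y : Int) :
    List.foldl max (max m y) l = max (List.foldl max m l) y := by
  induction l generalizing m with
  | nil => rfl
  | cons a t ih => simpa [max_right_comm m y a] using ih (max m a)

theorem foldl_max_absorb {l : List Int} {m y : Int} (h : y ≤ List.foldl max m l) :
    List.foldl max (max m y) l = List.foldl max m l := by
  rw [foldl_max_push]; exact max_eq_left h

theorem le_goP_foldl (t : List (String × String)) (c m : Int) :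
    c ≤ List.foldl max m (goP t c) := by
  induction t generalizing c m with
  | nil => simp [goP]
  | cons a s ih =>
    obtain ⟨x, p⟩ := a
    by_cases h : (x == p) = true
    · simp only [goP, h, if_pos]
      exact le_trans (by omega) (ih (c + 1) m)
    · simp only [goP, h]
      exact le_trans (le_max_right m c) (PySem.List.le_foldl_max _ _).1

-- A's inner loop body, as a function of the two (current, previous) pairs
def stepAB (s : Int × Int × Int) (p : (String × String) × (String × String)) : Int × Int × Int :=
  let row_count := if p.1.1 == p.1.2 then s.2.1 + 1 else 1
  let m1 := max s.1 row_count
  let col_count := if p.2.1 == p.2.2 then s.2.2 + 1 else 1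
  (max m1 col_count, row_count, col_count)

theorem scanAB_eq (l : List ((String × String) × (String × String))) (m rc cc : Int)
    (h1 : 1 ≤ m) (hrc : rc ≤ m) (hcc : cc ≤ m) :
    (l.foldl stepAB (m, rc, cc)).1 =
      List.foldl max (List.foldl max m (goP (l.map Prod.fst) rc)) (goP (l.map Prod.snd) cc) := by
  induction l generalizing m rc cc with
  | nil => simp [goP, max_eq_left hrc, max_eq_left hcc]
  | cons a t ih =>
    obtain ⟨⟨x, p⟩, y, q⟩ := a
    simp only [List.foldl_cons, List.map_cons]
    have hmF : ∀ R : List Int, m ≤ List.foldl max m R := fun R => (PySem.List.le_foldl_max R m).1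
    by_cases hx : (x == p) = true <;> by_cases hy : (y == q) = true
    · have hstep : stepAB (m, rc, cc) ((x, p), (y, q)) = (max (max m (rc + 1)) (cc + 1), rc + 1, cc + 1) := by
        simp [stepAB, hx, hy]
      rw [hstep, ih _ _ _ (by omega) (le_trans (le_max_right m (rc + 1)) (le_max_left _ _)) (le_max_right _ _)]
      simp only [goP, hx, hy, if_pos]
      rw [foldl_max_push, foldl_max_absorb (le_goP_foldl _ _ _),
        foldl_max_absorb (le_goP_foldl _ _ _)]
    · have hstep : stepAB (m, rc, cc) ((x, p), (y, q)) = (max (max m (rc + 1)) 1, rc + 1, 1) := by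
        simp [stepAB, hx, hy]
      rw [hstep, ih _ _ _ (by omega) (le_trans (le_max_right m (rc + 1)) (le_max_left _ _)) (by omega)]
      simp only [goP, hx, hy, if_pos, if_neg, Bool.not_eq_true, List.foldl_cons]
      rw [max_eq_left (le_trans h1 (le_max_left m (rc + 1))),
        foldl_max_absorb (le_goP_foldl _ _ _),
        max_eq_left (le_trans hcc (hmF _))]
    · have hstep : stepAB (m, rc, cc) ((x, p), (y, q)) = (max (max m 1) (cc + 1), 1, cc + 1) := by
        simp [stepAB, hx, hy]
      rw [hstep, ih _ _ _ (by omega) (by omega) (le_max_right _ _)]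
      simp only [goP, hx, hy, if_pos, if_neg, Bool.not_eq_true, List.foldl_cons]
      rw [max_eq_left h1, foldl_max_push, foldl_max_absorb (le_goP_foldl _ _ _),
        max_eq_left hrc]
    · have hstep : stepAB (m, rc, cc) ((x, p), (y, q)) = (max (max m 1) 1, 1, 1) := by
        simp [stepAB, hx, hy]
      rw [hstep, ih _ _ _ (by omega) (by omega) (by omega)]
      simp only [goP, hx, hy, if_neg, Bool.not_eq_true, List.foldl_cons]
      rw [max_eq_left h1, max_eq_left h1, max_eq_left hrc,
        max_eq_left (le_trans hcc (hmF _))]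

-- Source B's _runs loop equals the recursive run encoder goE
theorem runs_loop_eq (xs : List String) : ∀ (out : List Int) (c : Int) (p : String), 0 < c →
    pvFinish (xs.foldl pvRunsStep (out, c, some p)) = out ++ goE xs p c := by
  induction xs with
  | nil => intro out c p hc; simp [pvFinish, goE, hc]
  | cons x t ih =>
    intro out c p hc
    by_cases h : x = p
    · subst h
      have hcond : 0 < c ∧ ((some x : Option String) == some x) = true := ⟨hc, by simp⟩
      simp only [List.foldl_cons, pvRunsStep, hcond, if_pos, goE, beq_self_eq_true]
      exact ih out (c + 1) x (by omega)
    · have hcond : ¬ (0 < ((out, c, some p) : List Int × Int × Option String).2.1 ∧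
          ((out, c, some p) : List Int × Int × Option String).2.2 == some x) := by
        rintro ⟨-, hs⟩
        simp only [beq_iff_eq, Option.some.injEq] at hs
        exact h hs.symm
      have hxp : (x == p) = false := by simpa using h
      have hps : ((some p : Option String) == some x) = false := by
        simpa using fun e => h e.symm
      simp only [List.foldl_cons, pvRunsStep, hps, hc, if_pos, goE, hxp,
        Bool.false_eq_true, and_false, if_false]
      rw [ih (out ++ [c]) 1 x (by omega)]
      simp

theorem pvRuns_eq_goE (x : String) (t : List String) :
    pvRuns (x :: t) = goE t x 1 := by
  rw [pvRuns, List.foldl_cons]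
  rw [show pvRunsStep ([], 0, none) x = ([], 1, some x) by simp [pvRunsStep]]
  simpa using runs_loop_eq t [] 1 x (by omega)

theorem goE_eq_goP (t : List String) (p : String) (c : Int) :
    goE t p c = goP (adjP p t) c := by
  induction t generalizing p c with
  | nil => rfl
  | cons x s ih => by_cases h : (x == p) = true <;> simp [goE, goP, adjP, h, ih]

-- adjacent pairs of a line mapped over a consecutive range are the (g j, g (j-1)) pairs
theorem adjP_map_pyRange (g : Int → String) (a n : Int) :
    adjP (g a) ((PySem.List.pyRange (a + 1) n 1).map g)
      = (PySem.List.pyRange (a + 1) n 1).map (fun j => (g j, g (j - 1))) := by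
  by_cases h : a + 1 < n
  · have hk : ((n - (a + 1)).toNat) = (n - (a + 1)).toNat := rfl
    clear hk
    generalize hk : (n - (a + 1)).toNat = k
    induction k generalizing a with
    | zero =>
      have : n ≤ a + 1 := by omega
      omega
    | succ k ihk =>
      rw [PySem.List.pyRange_one_cons h]
      simp only [List.map_cons, adjP]
      have ha : a + 1 - 1 = a := by ring
      rw [ha]
      by_cases h2 : a + 1 + 1 < n
      · have := ihk (a + 1) h2 (by omega)
        rw [this]
      · have : PySem.List.pyRange (a + 1 + 1) n 1 = [] := PySem.List.pyRange_one_eq_nil (by omega)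
        simp [this, adjP]
  · have : PySem.List.pyRange (a + 1) n 1 = [] := PySem.List.pyRange_one_eq_nil (by omega)
    simp [this, adjP]

-- the head-cons decomposition of a line over range(0, n)
theorem map_pyRange_zero_cons (g : Int → String) (n : Int) (h : 0 < n) :
    (PySem.List.pyRange 0 n 1).map g = g 0 :: (PySem.List.pyRange 1 n 1).map g := by
  rw [PySem.List.pyRange_one_cons h]; simp

-- per-line run lists, as A's proof-normal form
def rowRuns (board : List (List String)) (n i : Int) : List Int :=
  goP ((PySem.List.pyRange 1 n 1).map (fun j => (pvGet board i j, pvGet board i (j - 1)))) 1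
def colRuns (board : List (List String)) (n i : Int) : List Int :=
  goP ((PySem.List.pyRange 1 n 1).map (fun j => (pvGet board j i, pvGet board (j - 1) i))) 1

theorem pvRuns_rowLine (board : List (List String)) (n i : Int) (h : 0 < n) :
    pvRuns ((PySem.List.pyRange 0 n 1).map (fun j => pvGet board i j)) = rowRuns board n i := by
  rw [map_pyRange_zero_cons _ _ h, pvRuns_eq_goE, goE_eq_goP, rowRuns]
  have := adjP_map_pyRange (fun j => pvGet board i j) 0 n
  simp only [zero_add] at this
  rw [this]

theorem pvRuns_colLine (board : List (List String)) (n i : Int) (h : 0 < n) :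
    pvRuns ((PySem.List.pyRange 0 n 1).map (fun j => pvGet board j i)) = colRuns board n i := by
  rw [map_pyRange_zero_cons _ _ h, pvRuns_eq_goE, goE_eq_goP, colRuns]
  have := adjP_map_pyRange (fun j => pvGet board j i) 0 n
  simp only [zero_add] at this
  rw [this]

-- fold of max over a flatMap
theorem foldl_max_flatMap (l : List Int) (f : Int → List Int) (m : Int) :
    l.foldl (fun acc i => List.foldl max acc (f i)) m = List.foldl max m (l.flatMap f) := by
  induction l generalizing m with
  | nil => rfl
  | cons a t ih => simp [List.flatMap_cons, List.foldl_append, ih]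

-- interleaved flatMap is a permutation of the two separate flatMaps
theorem flatMap_interleave_perm (l : List Int) (f g : Int → List Int) :
    (l.flatMap (fun i => f i ++ g i)).Perm (l.flatMap f ++ l.flatMap g) := by
  induction l with
  | nil => simp
  | cons a t ih =>
    simp only [List.flatMap_cons, List.append_assoc]
    exact ((ih.append_left (g a)).append_left (f a)).trans
      ((List.perm_append_comm_assoc (g a) (t.flatMap f) (t.flatMap g)).append_left (f a))

theorem foldl_max_perm {l1 l2 : List Int} (m : Int) (p : l1.Perm l2) :
    List.foldl max m l1 = List.foldl max m l2 :=
  @List.Perm.foldl_eq _ _ max _ _ ⟨fun _ _ _ => max_right_comm _ _ _⟩ p m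

-- A in normal form: fold of max over the interleaved per-index run lists
theorem max_candy_normal (board : List (List String)) (n : Int) :
    max_candy board n
      = List.foldl max 1 ((PySem.List.pyRange 0 n 1).flatMap
          (fun i => rowRuns board n i ++ colRuns board n i)) := by
  rw [max_candy]
  rw [← foldl_max_flatMap]
  have key : ∀ (idxs : List Int) (m : Int), 1 ≤ m →
      idxs.foldl (fun max_count i =>
        ((PySem.List.pyRange 1 n 1).foldl (fun (s : Int × Int × Int) j =>
          let row_count := if pvGet board i j == pvGet board i (j - 1) then s.2.1 + 1 else 1
          let m1 := max s.1 row_count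
          let col_count := if pvGet board j i == pvGet board (j - 1) i then s.2.2 + 1 else 1
          (max m1 col_count, row_count, col_count)) (max_count, 1, 1)).1) m
      = idxs.foldl (fun acc i => List.foldl max acc (rowRuns board n i ++ colRuns board n i)) m := by
    intro idxs
    induction idxs with
    | nil => intro m _; rfl
    | cons a t ih =>
      intro m hm
      simp only [List.foldl_cons]
      have hinner : ((PySem.List.pyRange 1 n 1).foldl (fun (s : Int × Int × Int) j =>
          let row_count := if pvGet board a j == pvGet board a (j - 1) then s.2.1 + 1 else 1
          let m1 := max s.1 row_count
          let col_count := if pvGet board j a == pvGet board (j - 1) a then s.2.2 + 1 else 1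
          (max m1 col_count, row_count, col_count)) (m, 1, 1)).1
          = List.foldl max m (rowRuns board n a ++ colRuns board n a) := by
        have hmap : ((PySem.List.pyRange 1 n 1).map
            (fun j => ((pvGet board a j, pvGet board a (j - 1)), (pvGet board j a, pvGet board (j - 1) a)))).foldl
            stepAB (m, 1, 1)
            = (PySem.List.pyRange 1 n 1).foldl (fun (s : Int × Int × Int) j =>
                stepAB s ((pvGet board a j, pvGet board a (j - 1)), (pvGet board j a, pvGet board (j - 1) a))) (m, 1, 1) := by
          rw [List.foldl_map]
        have := scanAB_eq ((PySem.List.pyRange 1 n 1).map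
            (fun j => ((pvGet board a j, pvGet board a (j - 1)), (pvGet board j a, pvGet board (j - 1) a))))
            m 1 1 hm hm hm
        rw [hmap] at this
        simp only [List.map_map] at this
        rw [List.foldl_append]
        exact this
      rw [hinner]
      exact ih _ (le_trans hm (PySem.List.le_foldl_max _ _).1)
  rw [key _ 1 le_rfl, foldl_max_flatMap]

-- B in normal form: fold of max over row run lists then column run lists
theorem max_candy_alt_normal (board : List (List String)) (n : Int) :
    max_candy_alt board n
      = List.foldl max 1 ((PySem.List.pyRange 0 n 1).flatMap (fun i => rowRuns board n i)
          ++ (PySem.List.pyRange 0 n 1).flatMap (fun i => colRuns board n i)) := by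
  by_cases h : 0 < n
  · rw [max_candy_alt]
    simp only [List.foldl_append, List.foldl_map]
    have hrow : (fun (b : Int) (i : Int) =>
        (pvRuns ((PySem.List.pyRange 0 n 1).map (fun j => pvGet board i j))).foldl
          (fun b r => max b r) b)
        = fun (b : Int) (i : Int) => List.foldl max b (rowRuns board n i) := by
      funext b i; rw [pvRuns_rowLine board n i h]
    have hcol : (fun (b : Int) (i : Int) =>
        (pvRuns ((PySem.List.pyRange 0 n 1).map (fun j => pvGet board j i))).foldl
          (fun b r => max b r) b)
        = fun (b : Int) (i : Int) => List.foldl max b (colRuns board n i) := by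
      funext b i; rw [pvRuns_colLine board n i h]
    rw [hrow, hcol, foldl_max_flatMap, foldl_max_flatMap]
  · rw [max_candy_alt]
    simp [PySem.List.pyRange_one_eq_nil (by omega : n ≤ 0)]

-- ===== VERDICT (by name: the statement is the Claim_ definition above) =====
theorem max_candy_spec : Claim_equal_max_candy := by
  intro board n _ _
  unfold Spec_max_candy
  rw [max_candy_normal, max_candy_alt_normal]
  exact foldl_max_perm 1 (flatMap_interleave_perm _ _ _)
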